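-- pv_equiv track=rewrite | github.com/Ardiyanto24/English-Learning-Agent | agents/vocab/generator.py | _split_format_distribution
-- ===== SOURCE A (Python) =====
-- def _split_format_distribution(
--     planner_format_dist: dict,
--     new_words_count: int,
-- ) -> tuple[dict, dict]:
--     """
--     Bagi format_distribution planner menjadi 2 bagian:
--     - new_formats   : slot format khusus untuk new words (dikirim ke generator LLM)
--     - review_formats: slot format khusus untuk review words (dikirim ke enrich LLM)
--
--     format_distribution dari planner adalah untuk TOTAL kata (new + review).
--     Fungsi ini mengambil new_words_count slot pertama untuk new words,
--     sisanya otomatis menjadi jatah review words.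
--
--     Contoh:
--         planner_format_dist = {tebak_arti: 3, sinonim_antonim: 1, tebak_inggris: 1}
--         new_words_count = 1
--         → new_formats    = {tebak_arti: 1}
--         → review_formats = {tebak_arti: 2, sinonim_antonim: 1, tebak_inggris: 1}
--
--     Contoh 2:
--         planner_format_dist = {tebak_arti: 3, sinonim_antonim: 1, tebak_inggris: 1}
--         new_words_count = 3
--         → new_formats    = {tebak_arti: 3}
--         → review_formats = {sinonim_antonim: 1, tebak_inggris: 1}
--
--     Args:
--         planner_format_dist: Format distribution dari planner (total new + review)
--         new_words_count    : Jumlah new words yang harus di-generate LLM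
--
--     Returns:
--         (new_formats, review_formats)
--     """
--     new_formats: dict = {}
--     review_formats: dict = {}
--     slots_left = new_words_count
--
--     for fmt, count in planner_format_dist.items():
--         if slots_left <= 0:
--             # Semua slot new words sudah terpenuhi → sisanya untuk review
--             review_formats[fmt] = count
--         elif count <= slots_left:
--             # Format ini seluruhnya masuk ke new words
--             new_formats[fmt] = count
--             slots_left -= count
--         else:
--             # Format ini dibagi: sebagian new, sebagian review
--             new_formats[fmt] = slots_left
--             review_formats[fmt] = count - slots_left
--             slots_left = 0
--
--     return new_formats, review_formats
-- ===== SOURCE B (Python) =====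
-- def _split_format_distribution(
--     planner_format_dist: dict,
--     new_words_count: int,
-- ) -> tuple[dict, dict]:
--     # Two-phase: first scan for the boundary (how many formats are reached while
--     # new-word slots remain), then build both dicts with slicing.
--     items = list(planner_format_dist.items())
--     remaining = new_words_count
--     k = 0
--     last = None
--     for fmt, count in items:
--         if remaining <= 0:
--             break
--         remaining -= count
--         k += 1
--         last = (fmt, count)
--     new_formats = dict(items[:k])
--     review_formats = {}
--     if remaining < 0 and last is not None:
--         # boundary format overflowed: split it between the two sides
--         fmt, count = last
--         new_formats[fmt] = count + remaining
--         review_formats[fmt] = -remaining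
--     review_formats.update(items[k:])
--     return new_formats, review_formats
-- ===== Notes on version B (the rewrite author's own statement) =====
-- stated objective: alternative
-- what changed: A threads three-branch per-item state (two dicts plus slots) through one loop; B first scans only for the split boundary (count k and overshoot), then builds both dicts by slicing the item list at k and patching the single boundary format.
import Mathlib
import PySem

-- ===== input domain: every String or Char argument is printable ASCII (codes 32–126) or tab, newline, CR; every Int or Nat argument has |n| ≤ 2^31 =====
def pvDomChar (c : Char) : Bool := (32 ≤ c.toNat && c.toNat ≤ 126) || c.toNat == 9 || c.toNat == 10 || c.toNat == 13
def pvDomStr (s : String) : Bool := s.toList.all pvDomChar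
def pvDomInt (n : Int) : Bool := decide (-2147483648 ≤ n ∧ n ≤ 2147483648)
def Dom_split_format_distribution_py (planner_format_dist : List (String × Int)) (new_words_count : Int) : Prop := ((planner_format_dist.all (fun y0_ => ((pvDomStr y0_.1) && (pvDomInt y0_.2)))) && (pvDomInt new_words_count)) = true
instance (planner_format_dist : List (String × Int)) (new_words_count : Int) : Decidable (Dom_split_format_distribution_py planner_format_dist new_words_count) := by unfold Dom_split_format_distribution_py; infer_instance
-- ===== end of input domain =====

-- B replaces A's three-branch state-threading loop by a boundary scan followed by list slicing; same cost, different decomposition.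


-- ===== PORT A =====
-- the for-loop of A: state (new_formats, review_formats, slots_left)
def splitLoopA (items : List (String × Int)) (newF revF : PySem.Dict String Int) (slots : Int) :
    PySem.Dict String Int × PySem.Dict String Int :=
  match items with
  | [] => (newF, revF)
  | (fmt, count) :: rest =>
    if slots ≤ 0 then splitLoopA rest newF (revF.insert fmt count) slots
    else if count ≤ slots then splitLoopA rest (newF.insert fmt count) revF (slots - count)
    else splitLoopA rest (newF.insert fmt slots) (revF.insert fmt (count - slots)) 0

def split_format_distribution_py (planner_format_dist : List (String × Int)) (new_words_count : Int) : (List (String × Int)) × (List (String × Int)) :=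
  let res := splitLoopA planner_format_dist PySem.Dict.empty PySem.Dict.empty new_words_count
  (res.1.items, res.2.items)

-- ===== PORT B =====
-- B's first loop: returns (k = #formats reached with slots remaining, final remaining, last processed item)
def fdScan (items : List (String × Int)) (remaining : Int) : Nat × Int × Option (String × Int) :=
  match items with
  | [] => (0, remaining, none)
  | (fmt, count) :: rest =>
    if remaining ≤ 0 then (0, remaining, none)
    else
      let (k, r, last) := fdScan rest (remaining - count)
      (k + 1, r, some (last.getD (fmt, count)))

def split_format_distribution_py_alt (planner_format_dist : List (String × Int)) (new_words_count : Int) : (List (String × Int)) × (List (String × Int)) :=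
  let (k, r, last) := fdScan planner_format_dist new_words_count
  let newD := PySem.Dict.ofList (planner_format_dist.take k)
  let revD : PySem.Dict String Int := PySem.Dict.empty
  let (newD, revD) :=
    match (if r < 0 then last else none) with
    | some (fmt, count) => (newD.insert fmt (count + r), revD.insert fmt (-r))
    | none => (newD, revD)
  let revD := revD.update (planner_format_dist.drop k)
  (newD.items, revD.items)

-- ===== PRECONDITION & SPEC =====
-- Pre_ excludes association lists with duplicate format keys: A's parameter is a Python dict, which cannot
-- hold duplicate keys, so such lists lie outside the dict abstraction and their handling is accidental.
def Pre_split_format_distribution_py (planner_format_dist : List (String × Int)) (new_words_count : Int) : Prop :=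
  (planner_format_dist.map Prod.fst).Nodup
instance (planner_format_dist : List (String × Int)) (new_words_count : Int) : Decidable (Pre_split_format_distribution_py planner_format_dist new_words_count) := by unfold Pre_split_format_distribution_py; infer_instance
def pvWitness_split_format_distribution_py : (List (String × Int)) × Int := ([("tebak_arti", 3), ("sinonim_antonim", 1)], 1)

def Spec_split_format_distribution_py (planner_format_dist : List (String × Int)) (new_words_count : Int) (out : (List (String × Int)) × (List (String × Int))) : Prop := out = split_format_distribution_py_alt planner_format_dist new_words_count
instance (planner_format_dist : List (String × Int)) (new_words_count : Int) (out : (List (String × Int)) × (List (String × Int))) : Decidable (Spec_split_format_distribution_py planner_format_dist new_words_count out) := by unfold Spec_split_format_distribution_py; infer_instance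

-- ===== CLAIM (what is proved, stated in full; the proofs are below) =====
def Claim_equal_split_format_distribution_py : Prop := ∀ (planner_format_dist : List (String × Int)) (new_words_count : Int), Dom_split_format_distribution_py planner_format_dist new_words_count → Pre_split_format_distribution_py planner_format_dist new_words_count → Spec_split_format_distribution_py planner_format_dist new_words_count (split_format_distribution_py planner_format_dist new_words_count)

-- ===== LEMMAS AND PROOFS =====

-- canonical description of the split (proof-side only)
def canonNew : List (String × Int) → Int → List (String × Int)
  | [], _ => []
  | (f, c) :: rest, s =>
    if s ≤ 0 then []
    else if c ≤ s then (f, c) :: canonNew rest (s - c)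
    else [(f, s)]

def canonRev : List (String × Int) → Int → List (String × Int)
  | [], _ => []
  | (f, c) :: rest, s =>
    if s ≤ 0 then (f, c) :: rest
    else if c ≤ s then canonRev rest (s - c)
    else (f, c - s) :: rest

lemma canonNew_nonpos (items : List (String × Int)) (s : Int) (h : s ≤ 0) : canonNew items s = [] := by
  cases items with
  | nil => rfl
  | cons x rest => cases x; simp [canonNew, h]

lemma canonRev_nonpos (items : List (String × Int)) (s : Int) (h : s ≤ 0) : canonRev items s = items := by
  cases items with
  | nil => rfl
  | cons x rest => cases x; simp [canonRev, h]

lemma splitLoopA_items : ∀ (items : List (String × Int)) (newF revF : PySem.Dict String Int) (s : Int),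
    (items.map Prod.fst).Nodup →
    (∀ p ∈ items, newF.contains p.1 = false) →
    (∀ p ∈ items, revF.contains p.1 = false) →
    (splitLoopA items newF revF s).1.items = newF.items ++ canonNew items s ∧
    (splitLoopA items newF revF s).2.items = revF.items ++ canonRev items s := by
  intro items
  induction items with
  | nil => intro newF revF s _ _ _; simp [splitLoopA, canonNew, canonRev]
  | cons x rest ih =>
    obtain ⟨f, c⟩ := x
    intro newF revF s hnd hnew hrev
    have hmem : f ∉ rest.map Prod.fst := (List.nodup_cons.mp (by simpa using hnd)).1
    have hnd' : (rest.map Prod.fst).Nodup := (List.nodup_cons.mp (by simpa using hnd)).2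
    have hne : ∀ p ∈ rest, (p.1 == f) = false := by
      intro p hp
      have : p.1 ≠ f := fun e => hmem (e ▸ List.mem_map_of_mem hp)
      simpa using this
    have hnewf : newF.contains f = false := hnew (f, c) (List.mem_cons_self)
    have hrevf : revF.contains f = false := hrev (f, c) (List.mem_cons_self)
    by_cases hs : s ≤ 0
    · have h2 : ∀ p ∈ rest, (revF.insert f c).contains p.1 = false := by
        intro p hp
        rw [PySem.Dict.contains_insert]
        simp [hne p hp, hrev p (List.mem_cons_of_mem _ hp)]
      have := ih newF (revF.insert f c) s hnd' (fun p hp => hnew p (List.mem_cons_of_mem _ hp)) h2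
      simp only [splitLoopA, if_pos hs]
      refine ⟨?_, ?_⟩
      · rw [this.1, canonNew_nonpos rest s hs, canonNew_nonpos ((f, c) :: rest) s hs]
      · rw [this.2, PySem.Dict.items_insert_of_not_contains _ _ hrevf,
          canonRev_nonpos rest s hs]
        simp [canonRev, hs]
    · by_cases hc : c ≤ s
      · have h1 : ∀ p ∈ rest, (newF.insert f c).contains p.1 = false := by
          intro p hp
          rw [PySem.Dict.contains_insert]
          simp [hne p hp, hnew p (List.mem_cons_of_mem _ hp)]
        have := ih (newF.insert f c) revF (s - c) hnd' h1 (fun p hp => hrev p (List.mem_cons_of_mem _ hp))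
        simp only [splitLoopA, if_neg (by omega : ¬ s ≤ 0), if_pos hc]
        refine ⟨?_, ?_⟩
        · rw [this.1, PySem.Dict.items_insert_of_not_contains _ _ hnewf]
          simp [canonNew, hc, hs]
        · rw [this.2]
          simp [canonRev, hc, hs]
      · have h1 : ∀ p ∈ rest, (newF.insert f s).contains p.1 = false := by
          intro p hp
          rw [PySem.Dict.contains_insert]
          simp [hne p hp, hnew p (List.mem_cons_of_mem _ hp)]
        have h2 : ∀ p ∈ rest, (revF.insert f (c - s)).contains p.1 = false := by
          intro p hp
          rw [PySem.Dict.contains_insert]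
          simp [hne p hp, hrev p (List.mem_cons_of_mem _ hp)]
        have := ih (newF.insert f s) (revF.insert f (c - s)) 0 hnd' h1 h2
        simp only [splitLoopA, if_neg (by omega : ¬ s ≤ 0), if_neg hc]
        refine ⟨?_, ?_⟩
        · rw [this.1, PySem.Dict.items_insert_of_not_contains _ _ hnewf,
            canonNew_nonpos rest 0 le_rfl]
          simp [canonNew, hc, hs]
        · rw [this.2, PySem.Dict.items_insert_of_not_contains _ _ hrevf,
            canonRev_nonpos rest 0 le_rfl]
          simp [canonRev, hc, hs]

lemma fdScan_nonpos (items : List (String × Int)) (m : Int) (h : m ≤ 0) : fdScan items m = (0, m, none) := by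
  cases items with
  | nil => rfl
  | cons x rest => cases x; simp [fdScan, h]

lemma fdScan_none (items : List (String × Int)) (m : Int) (h : (fdScan items m).2.2 = none) :
    fdScan items m = (0, m, none) := by
  cases items with
  | nil => rfl
  | cons x rest =>
    obtain ⟨f, c⟩ := x
    by_cases hm : m ≤ 0
    · simp [fdScan, hm]
    · exfalso
      revert h
      simp [fdScan, hm]

lemma fdScan_spec : ∀ (items : List (String × Int)) (n : Int),
    (match (if (fdScan items n).2.1 < 0 then (fdScan items n).2.2 else none) with
     | none => canonNew items n = items.take (fdScan items n).1 ∧ canonRev items n = items.drop (fdScan items n).1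
     | some (f, c) => ∃ pre, items.take (fdScan items n).1 = pre ++ [(f, c)] ∧
         canonNew items n = pre ++ [(f, c + (fdScan items n).2.1)] ∧
         canonRev items n = (f, -(fdScan items n).2.1) :: items.drop (fdScan items n).1) := by
  intro items
  induction items with
  | nil => intro n; simp [fdScan, canonNew, canonRev]
  | cons x rest ih =>
    obtain ⟨f, c⟩ := x
    intro n
    by_cases hn : n ≤ 0
    · simp [fdScan, hn, canonNew, canonRev]
    · rcases hsc : fdScan rest (n - c) with ⟨k', r, last'⟩
      by_cases hr : r < 0
      · cases last' with
        | none =>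
          have h0 := fdScan_none rest (n - c) (by rw [hsc])
          rw [hsc] at h0
          have hk0 : k' = 0 := congrArg Prod.fst h0
          have hr0 : r = n - c := congrArg (fun q => q.2.1) h0
          have hcn : ¬ c ≤ n := by omega
          simp only [fdScan, if_neg hn, hsc]
          simp only [Option.getD, if_pos hr]
          refine ⟨[], ?_, ?_, ?_⟩
          · simp [hk0]
          · have hcr : c + r = n := by omega
            simp [canonNew, hn, hcn, hcr]
          · have hcr : -r = c - n := by omega
            simp [canonRev, hn, hcn, hcr, hk0]
        | some p =>
          obtain ⟨f', c'⟩ := p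
          have hcn : c ≤ n := by
            by_contra hcn
            have h0 := fdScan_nonpos rest (n - c) (by omega)
            rw [hsc] at h0
            exact absurd (congrArg (fun q => q.2.2) h0) (by simp)
          have hih := ih (n - c)
          rw [hsc] at hih
          simp only [if_pos hr] at hih
          obtain ⟨pre, htake, hnew, hrev⟩ := hih
          simp only [fdScan, if_neg hn, hsc]
          simp only [Option.getD, if_pos hr]
          refine ⟨(f, c) :: pre, ?_, ?_, ?_⟩
          · simp [htake]
          · simp [canonNew, hn, hcn, hnew]
          · simp [canonRev, hn, hcn, hrev]
      · have hcn : c ≤ n := by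
          by_contra hcn
          have h0 := fdScan_nonpos rest (n - c) (by omega)
          rw [hsc] at h0
          have h1 : r = n - c := congrArg (fun q => q.2.1) h0
          omega
        have hih := ih (n - c)
        rw [hsc] at hih
        simp only [if_neg hr] at hih
        simp only [fdScan, if_neg hn, hsc, if_neg hr]
        refine ⟨?_, ?_⟩
        · simp [canonNew, hn, hcn, hih.1]
        · simp [canonRev, hn, hcn, hih.2]

lemma update_items_fresh (d : PySem.Dict String Int) (l : List (String × Int))
    (h1 : (l.map Prod.fst).Nodup) (h2 : ∀ p ∈ l, d.contains p.1 = false) :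
    (d.update l).items = d.items ++ l := by
  have h := PySem.Dict.items_foldl_insert_fresh l Prod.fst Prod.snd d h2 h1
  simpa [PySem.Dict.update] using h

lemma alt_eq_canon (items : List (String × Int)) (n : Int) (hnd : (items.map Prod.fst).Nodup) :
    split_format_distribution_py_alt items n = (canonNew items n, canonRev items n) := by
  have hspec := fdScan_spec items n
  rcases hsc : fdScan items n with ⟨k, r, last⟩
  rw [hsc] at hspec
  simp only at hspec
  have hsplit : items.map Prod.fst = (items.take k).map Prod.fst ++ (items.drop k).map Prod.fst := by
    rw [← List.map_append, List.take_append_drop]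
  have hndt : ((items.take k).map Prod.fst).Nodup := by
    rw [hsplit] at hnd; exact hnd.of_append_left
  have hndd : ((items.drop k).map Prod.fst).Nodup := by
    rw [hsplit] at hnd; exact hnd.of_append_right
  have hdisj : ∀ a ∈ (items.take k).map Prod.fst, a ∉ (items.drop k).map Prod.fst := by
    rw [hsplit] at hnd
    exact fun a ha hb => (List.Nodup.disjoint hnd) ha hb
  have hofl : (PySem.Dict.ofList (items.take k)).items = items.take k := by
    have := update_items_fresh PySem.Dict.empty (items.take k) hndt
      (fun p _ => by simp)
    simpa [PySem.Dict.ofList, PySem.Dict.empty] using this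
  simp only [split_format_distribution_py_alt, hsc]
  rcases hcase : (if r < 0 then last else none) with - | ⟨f, c⟩
  · rw [hcase] at hspec
    simp only
    refine Prod.ext ?_ ?_
    · simpa [hofl] using hspec.1.symm
    · have h2 := update_items_fresh PySem.Dict.empty (items.drop k) hndd (fun p _ => by simp)
      rw [h2, hspec.2]
      simp [PySem.Dict.empty]
  · rw [hcase] at hspec
    obtain ⟨pre, htake, hnew, hrev⟩ := hspec
    simp only
    have hdict : PySem.Dict.ofList (items.take k) = PySem.Dict.mk (pre ++ [(f, c)]) := by
      apply PySem.Dict.ext; rw [hofl, htake]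
    have hfnotpre : f ∉ pre.map Prod.fst := by
      have : ((pre ++ [(f, c)]).map Prod.fst).Nodup := by rw [← htake]; exact hndt
      simp only [List.map_append] at this
      intro hf
      exact (List.disjoint_of_nodup_append this) hf (by simp)
    have hcont : (PySem.Dict.mk (pre ++ [(f, c)])).contains f = true := by
      rw [PySem.Dict.contains_eq_decide_mem_keys]
      simp [PySem.Dict.keys]
    refine Prod.ext ?_ ?_
    · rw [hdict, PySem.Dict.items_insert_of_contains _ _ hcont, hnew]
      simp only [List.map_append]
      congr 1
      · refine List.map_congr_left ?_ |>.trans (List.map_id _)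
        intro p hp
        have : p.1 ≠ f := fun e => hfnotpre (e ▸ List.mem_map_of_mem hp)
        simp [this]
      · simp
    · have hins : (PySem.Dict.empty.insert f (-r) : PySem.Dict String Int).items = [(f, -r)] := by
        rw [PySem.Dict.items_insert_of_not_contains _ _ (by simp)]
        simp [PySem.Dict.empty]
      have hfix : (PySem.Dict.empty.insert f (-r) : PySem.Dict String Int) = PySem.Dict.mk [(f, -r)] :=
        PySem.Dict.ext hins
      have hfin : f ∈ (items.take k).map Prod.fst := by
        rw [htake]; simp
      have hfr : ∀ p ∈ items.drop k, (PySem.Dict.mk [(f, -r)] : PySem.Dict String Int).contains p.1 = false := by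
        intro p hp
        rw [PySem.Dict.contains_eq_decide_mem_keys]
        have : p.1 ≠ f := by
          intro e
          exact (hdisj f hfin) (e ▸ List.mem_map_of_mem hp)
        simp [PySem.Dict.keys, this]
      rw [hfix, update_items_fresh _ _ hndd hfr, hrev]
      simp

-- ===== VERDICT (by name: the statement is the Claim_ definition above) =====
theorem split_format_distribution_py_spec : Claim_equal_split_format_distribution_py := by
  intro pfd n _hdom hpre
  unfold Spec_split_format_distribution_py
  have hA := splitLoopA_items pfd PySem.Dict.empty PySem.Dict.empty n hpre
    (by intro p _; simp) (by intro p _; simp)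
  rw [alt_eq_canon pfd n hpre]
  unfold split_format_distribution_py
  simp only []
  refine Prod.ext ?_ ?_
  · simp only []; rw [hA.1]; simp [PySem.Dict.empty]
  · simp only []; rw [hA.2]; simp [PySem.Dict.empty]
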